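-- pv_equiv track=rewrite | github.com/akamorii/poker_consol | combinations.py | two_pars
-- ===== SOURCE A (Python) =====
-- def two_pars (hand_and_table):
--     pars_count = 0
--     arr = []
--     for s in hand_and_table:
--         arr.append(s[1]) #добавление в массив значений
--     ss = 0
--     while ss < len(arr):
--         # arr_len = ss-ss
--         find_val = arr.pop(ss-ss) #т.к из массива удаляеться значение отнимаем кол во итераций
--         if find_val in arr:
--             arr.pop(arr.index(find_val))
--             pars_count+=1
--             ss+=1
--     # for ss in range(0,len(arr)):
--     #     arr_len = ss-ss-pars_count
--     #     find_val = arr.pop(arr_len) #т.к из массива удаляеться значение отнимаем кол во итераций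
--     #     if find_val in arr:
--     #         arr.pop(arr.index(find_val))
--     #         pars_count+=1
--     if pars_count > 1:
--         return True
--     return False
-- ===== SOURCE B (Python) =====
-- def two_pars(hand_and_table):
--     unpaired = set()
--     pairs = 0
--     for s in hand_and_table:
--         v = s[1]
--         if v in unpaired:
--             unpaired.discard(v)
--             pairs += 1
--         else:
--             unpaired.add(v)
--     return pairs >= 2
-- ===== Notes on version B (the rewrite author's own statement) =====
-- stated objective: simpler
-- what changed: Replaces A's destructive while-loop over a list (pop front, membership scan, index scan, pop) with one forward pass keeping a set of values seen an odd number of times and a pair counter.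
import Mathlib
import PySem

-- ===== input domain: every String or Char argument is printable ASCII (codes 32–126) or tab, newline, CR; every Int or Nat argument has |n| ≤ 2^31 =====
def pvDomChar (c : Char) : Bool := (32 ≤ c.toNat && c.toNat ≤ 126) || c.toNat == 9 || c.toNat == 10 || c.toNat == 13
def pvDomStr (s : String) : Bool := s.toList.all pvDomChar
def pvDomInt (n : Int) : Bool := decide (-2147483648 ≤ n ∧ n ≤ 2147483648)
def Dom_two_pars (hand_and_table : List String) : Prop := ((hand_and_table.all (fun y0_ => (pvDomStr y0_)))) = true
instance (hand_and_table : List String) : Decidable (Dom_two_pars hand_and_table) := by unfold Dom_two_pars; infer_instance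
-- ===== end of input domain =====

-- B replaces A's destructive repeated list scanning with one pass over the hand keeping a
-- set of values seen an odd number of times; equal on all inputs where A returns (Pre_).

-- ===== PORT A =====
-- s[1] of a card string (Pre_ guarantees the index is in range, so the default is never used)
def pvCardVal (s : String) : Char := (PySem.Str.pyGet? s 1).getD ' '

-- A's while loop. In A, `pars_count` and `ss` start at 0 and are incremented together in the
-- same branch, so they are always equal; the port keeps the single counter `ss` and returns it.
-- `arr.pop(ss-ss)` is `arr.pop(0)` = the head split; `arr.pop(arr.index(v))` removes the
-- first occurrence of v (= List.erase).
def twoParsLoop : List Char → Nat → Nat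
  | arr, ss =>
    if ss < arr.length then
      match arr with
      | [] => ss
      | x :: rest =>
        if x ∈ rest then twoParsLoop (rest.erase x) (ss + 1)
        else twoParsLoop rest ss
    else ss
termination_by arr => arr.length
decreasing_by
  · have : (rest.erase x).length ≤ rest.length := List.length_erase_le; simp; omega
  · simp

def two_pars (hand_and_table : List String) : Bool :=
  -- arr built by appending s[1] for each s
  let arr := hand_and_table.foldl (fun arr s => arr ++ [pvCardVal s]) []
  decide (1 < twoParsLoop arr 0)

-- ===== PORT B =====
-- one pass: toggle membership of s[1] in the `unpaired` set, count completed pairs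
def twoParsAltLoop : List String → PySem.Set Char → Nat → Nat
  | [], _, pairs => pairs
  | s :: rest, unpaired, pairs =>
    let v := pvCardVal s
    if v ∈ unpaired then twoParsAltLoop rest (PySem.Set.discard unpaired v) (pairs + 1)
    else twoParsAltLoop rest (PySem.Set.add unpaired v) pairs

def two_pars_alt (hand_and_table : List String) : Bool :=
  decide (2 ≤ twoParsAltLoop hand_and_table PySem.Set.empty 0)

-- ===== PRECONDITION & SPEC =====
-- Pre_ excludes exactly the inputs on which the Python A raises IndexError: a string of
-- length < 2 makes `s[1]` raise (in B too).
def Pre_two_pars (hand_and_table : List String) : Prop :=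
  ∀ s ∈ hand_and_table, 2 ≤ s.toList.length

instance (hand_and_table : List String) : Decidable (Pre_two_pars hand_and_table) := by
  unfold Pre_two_pars; infer_instance

def pvWitness_two_pars : List String := ["7h", "7d", "Ks", "Kd", "2c"]

def Spec_two_pars (hand_and_table : List String) (out : Bool) : Prop :=
  out = two_pars_alt hand_and_table
instance (hand_and_table : List String) (out : Bool) : Decidable (Spec_two_pars hand_and_table out) := by
  unfold Spec_two_pars; infer_instance

-- ===== CLAIM (what is proved, stated in full; the proofs are below) =====
def Claim_equal_two_pars : Prop :=
  ∀ (hand_and_table : List String), Dom_two_pars hand_and_table →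
    Pre_two_pars hand_and_table → Spec_two_pars hand_and_table (two_pars hand_and_table)

-- ===== LEMMAS AND PROOFS =====

-- canonical pair count: the number of disjoint equal pairs in a list of values
def pairsC : List Char → Nat
  | [] => 0
  | x :: t => if x ∈ t then pairsC (t.erase x) + 1 else pairsC t
termination_by l => l.length
decreasing_by
  · have : (t.erase x).length ≤ t.length := List.length_erase_le; simp; omega
  · simp

theorem pairsC_small (l : List Char) (h : l.length ≤ 1) : pairsC l = 0 := by
  match l with
  | [] => simp [pairsC]
  | [x] => simp [pairsC]
  | x :: y :: t => simp at h

-- A's loop, capped at 2, computes ss + pairsC arr capped at 2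
theorem twoParsLoop_min (arr : List Char) (ss : Nat) :
    min (twoParsLoop arr ss) 2 = min (ss + pairsC arr) 2 := by
  generalize hn : arr.length = n
  induction n using Nat.strong_induction_on generalizing arr ss with
  | _ n ih =>
    by_cases h : ss < arr.length
    · match arr with
      | x :: rest =>
        rw [twoParsLoop, pairsC, if_pos h]
        by_cases hx : x ∈ rest
        · rw [if_pos hx, if_pos hx]
          have hlen : (rest.erase x).length < n := by
            have hr : (List.erase rest x).length = rest.length - 1 :=
              List.length_erase_of_mem hx
            simp at hn; omega
          rw [ih _ hlen _ _ rfl]; omega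
        · rw [if_neg hx, if_neg hx]
          have hlen : rest.length < n := by simp at hn; omega
          rw [ih _ hlen _ _ rfl]
    · have hls : twoParsLoop arr ss = ss := by
        rw [twoParsLoop.eq_def]; simp [h]
      rw [hls]
      rcases Nat.lt_or_ge ss 2 with hs | hs
      · have : pairsC arr = 0 := pairsC_small arr (by omega)
        omega
      · omega

-- B's loop adds its accumulator
theorem twoParsAltLoop_acc (l : List String) (S : PySem.Set Char) (p : Nat) :
    twoParsAltLoop l S p = p + twoParsAltLoop l S 0 := by
  induction l generalizing S p with
  | nil => simp [twoParsAltLoop]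
  | cons s rest ih =>
    rw [twoParsAltLoop, twoParsAltLoop]
    by_cases hv : pvCardVal s ∈ S
    · rw [if_pos hv, if_pos hv, ih _ (p + 1), ih _ (0 + 1)]; omega
    · rw [if_neg hv, if_neg hv]; exact ih _ p

-- B's loop only looks at the set through membership
theorem twoParsAltLoop_congr (l : List String) (S S' : PySem.Set Char)
    (hmem : ∀ x, x ∈ S ↔ x ∈ S') (p : Nat) :
    twoParsAltLoop l S p = twoParsAltLoop l S' p := by
  induction l generalizing S S' p with
  | nil => simp [twoParsAltLoop]
  | cons s rest ih =>
    rw [twoParsAltLoop, twoParsAltLoop]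
    by_cases hv : pvCardVal s ∈ S
    · rw [if_pos hv, if_pos ((hmem _).mp hv)]
      refine ih _ _ (fun x => ?_) _
      simp [PySem.Set.mem_discard, hmem x]
    · rw [if_neg hv, if_neg (fun h => hv ((hmem _).mpr h))]
      refine ih _ _ (fun x => ?_) _
      simp [PySem.Set.mem_add, hmem x]

-- toggling a fresh value v through B's loop = one pair with v's first matching partner
theorem twoParsAltLoop_toggle (l : List String) (S : PySem.Set Char) (v : Char)
    (hv : v ∉ S) (p : Nat) :
    twoParsAltLoop l (PySem.Set.add S v) p =
      if v ∈ l.map pvCardVal then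
        twoParsAltLoop (l.eraseP (fun s => pvCardVal s == v)) S (p + 1)
      else twoParsAltLoop l S p := by
  induction l generalizing S p with
  | nil => simp [twoParsAltLoop]
  | cons s rest ih =>
    by_cases hy : pvCardVal s = v
    · have hmem : v ∈ PySem.Set.add S v := by simp [PySem.Set.mem_add]
      have hbeq : (pvCardVal s == v) = true := by simp [hy]
      rw [twoParsAltLoop]
      rw [if_pos (hy ▸ hmem), if_pos (by simp [hy])]
      simp only [List.eraseP_cons, hbeq, cond_true]
      rw [twoParsAltLoop_congr rest _ S (fun x => ?_) (p + 1)]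
      simp only [hy, PySem.Set.mem_discard, PySem.Set.mem_add]
      constructor
      · rintro ⟨h1 | h1, h2⟩
        · exact h1
        · exact absurd h1 h2
      · intro h1; exact ⟨Or.inl h1, fun h => hv (h ▸ h1)⟩
    · have hbeq : (pvCardVal s == v) = false := by simp [hy]
      have hvcons : (v ∈ (s :: rest).map pvCardVal) ↔ v ∈ rest.map pvCardVal := by
        simp only [List.map_cons, List.mem_cons]
        constructor
        · rintro (h | h)
          · exact absurd h.symm hy
          · exact h
        · exact Or.inr
      by_cases hs : pvCardVal s ∈ S
      · rw [twoParsAltLoop, if_pos (by simp [PySem.Set.mem_add, hs])]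
        rw [twoParsAltLoop_congr rest _ (PySem.Set.add (PySem.Set.discard S (pvCardVal s)) v)
          (fun x => by
            simp only [PySem.Set.mem_discard, PySem.Set.mem_add]
            constructor
            · rintro ⟨h1 | h1, h2⟩
              · exact Or.inl ⟨h1, h2⟩
              · exact Or.inr h1
            · rintro (⟨h1, h2⟩ | h1)
              · exact ⟨Or.inl h1, h2⟩
              · exact ⟨Or.inr h1, by subst h1; exact fun hc => hy hc.symm⟩) (p + 1)]
        rw [ih _ (by simp [PySem.Set.mem_discard, hv]) _]
        by_cases hvr : v ∈ rest.map pvCardVal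
        · rw [if_pos hvr, if_pos (hvcons.mpr hvr)]
          simp only [List.eraseP_cons, hbeq, cond_false]
          rw [twoParsAltLoop, if_pos hs]
        · rw [if_neg hvr, if_neg (fun h => hvr (hvcons.mp h))]
          rw [twoParsAltLoop, if_pos hs]
      · rw [twoParsAltLoop, if_neg (by
          simp only [PySem.Set.mem_add]
          rintro (h | h)
          · exact hs h
          · exact hy h)]
        rw [twoParsAltLoop_congr rest _ (PySem.Set.add (PySem.Set.add S (pvCardVal s)) v)
          (fun x => by simp only [PySem.Set.mem_add]; tauto) p]
        rw [ih _ (by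
          simp only [PySem.Set.mem_add]
          rintro (h | h)
          · exact hv h
          · exact hy h.symm) _]
        by_cases hvr : v ∈ rest.map pvCardVal
        · rw [if_pos hvr, if_pos (hvcons.mpr hvr)]
          simp only [List.eraseP_cons, hbeq, cond_false]
          rw [twoParsAltLoop, if_neg hs]
        · rw [if_neg hvr, if_neg (fun h => hvr (hvcons.mp h))]
          rw [twoParsAltLoop, if_neg hs]

theorem twoParsAltLoop_eq_pairsC (l : List String) :
    twoParsAltLoop l PySem.Set.empty 0 = pairsC (l.map pvCardVal) := by
  generalize hn : l.length = n
  induction n using Nat.strong_induction_on generalizing l with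
  | _ n ih =>
    match l with
    | [] => simp [twoParsAltLoop, pairsC]
    | s :: rest =>
      have hv : pvCardVal s ∉ (PySem.Set.empty : PySem.Set Char) := by
        simp [PySem.Set.empty]
      rw [twoParsAltLoop, if_neg hv]
      rw [twoParsAltLoop_toggle rest PySem.Set.empty (pvCardVal s) hv 0]
      rw [List.map_cons, pairsC]
      by_cases hm : pvCardVal s ∈ rest.map pvCardVal
      · rw [if_pos hm, if_pos hm, twoParsAltLoop_acc]
        have herase : (rest.eraseP (fun t => pvCardVal t == pvCardVal s)).map pvCardVal
            = (rest.map pvCardVal).erase (pvCardVal s) := by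
          rw [List.erase_eq_eraseP', List.eraseP_map]; rfl
        have hlen : (rest.eraseP (fun t => pvCardVal t == pvCardVal s)).length < n := by
          have h2 : (rest.eraseP fun t => pvCardVal t == pvCardVal s).length ≤ rest.length :=
            List.length_eraseP_le
          simp at hn; omega
        rw [ih _ hlen _ rfl, herase]; omega
      · rw [if_neg hm, if_neg hm]
        have hlen : rest.length < n := by simp at hn; omega
        rw [ih _ hlen _ rfl]

-- the foldl that builds A's arr is map
theorem arr_eq_map (l : List String) :
    l.foldl (fun arr s => arr ++ [pvCardVal s]) [] = l.map pvCardVal := by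
  simpa using PySem.List.foldl_append_singleton_eq_map pvCardVal l []

-- ===== VERDICT (by name: the statement is the Claim_ definition above) =====
theorem two_pars_spec : Claim_equal_two_pars := by
  intro l _ _
  unfold Spec_two_pars two_pars two_pars_alt
  rw [arr_eq_map, twoParsAltLoop_eq_pairsC]
  have h := twoParsLoop_min (l.map pvCardVal) 0
  simp only [Nat.zero_add] at h
  by_cases h1 : 1 < twoParsLoop (l.map pvCardVal) 0
  · have h2 : 2 ≤ pairsC (l.map pvCardVal) := by omega
    simp [h1, h2]
  · have h2 : ¬ 2 ≤ pairsC (l.map pvCardVal) := by omega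
    simp [h1, h2]
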